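-- pv_equiv track=rewrite | github.com/monosd-prog/pump_short | scripts/clean_short_pump_duplicate_outcomes.py | _resolve_duplicates
-- ===== SOURCE A (Python) =====
-- from collections import defaultdict
--
-- NON_TIMEOUT_OUTCOMES = ("TP_hit", "SL_hit")
--
-- def _event_id(row: dict) -> str:
--     return (row.get("event_id") or row.get("eventId") or "").strip()
--
-- def _outcome_val(row: dict) -> str:
--     return (row.get("outcome") or row.get("end_reason") or "").strip()
--
-- def _is_timeout(row: dict) -> bool:
--     o = _outcome_val(row).upper()
--     return o == "TIMEOUT"
--
-- def _is_non_timeout(row: dict) -> bool: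
--     o = _outcome_val(row)
--     return o in NON_TIMEOUT_OUTCOMES
--
-- def _resolve_duplicates(rows: list[dict]) -> tuple[list[dict], list[dict], list[str]]:
--     """
--     Group by event_id, decide which rows to keep and drop.
--     Returns (rows_to_keep, rows_to_drop, warnings).
--     """
--     by_event: dict[str, list[tuple[int, dict]]] = defaultdict(list)
--     no_event_indices: set[int] = set()
--     for i, r in enumerate(rows):
--         eid = _event_id(r)
--         if eid:
--             by_event[eid].append((i, r))
--         else:
--             no_event_indices.add(i)
--
--     keep_indices: set[int] = set(no_event_indices)
--     drop_indices: set[int] = set()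
--     warnings: list[str] = []
--
--     for event_id, items in by_event.items():
--         if len(items) <= 1:
--             keep_indices.add(items[0][0])
--             continue
--
--         non_timeout = [(i, r) for i, r in items if _is_non_timeout(r)]
--         timeout = [(i, r) for i, r in items if _is_timeout(r)]
--         other = [(i, r) for i, r in items if not _is_non_timeout(r) and not _is_timeout(r)]
--
--         if len(non_timeout) > 1:
--             warnings.append(f"event_id={event_id}: multiple non-TIMEOUT outcomes {[_outcome_val(r) for _, r in non_timeout]} — skip group")
--             keep_indices.update(i for i, _ in items)
--             continue
--
--         if non_timeout:
--             keep_indices.add(non_timeout[0][0])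
--             drop_indices.update(i for i, _ in timeout)
--             if other:
--                 drop_indices.update(i for i, _ in other)
--             continue
--
--         if timeout:
--             keep_indices.add(timeout[0][0])
--             drop_indices.update(i for i, _ in timeout[1:])
--             if other:
--                 drop_indices.update(i for i, _ in other)
--             continue
--
--         if other:
--             keep_indices.add(other[0][0])
--             drop_indices.update(i for i, _ in other[1:])
--
--     rows_to_keep = [r for i, r in enumerate(rows) if i not in drop_indices]
--     rows_to_drop = [r for i, r in enumerate(rows) if i in drop_indices]
--     return rows_to_keep, rows_to_drop, warnings
-- ===== SOURCE B (Python) =====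
-- NON_TIMEOUT_OUTCOMES = ("TP_hit", "SL_hit")
--
-- def _event_id(row: dict) -> str:
--     return (row.get("event_id") or row.get("eventId") or "").strip()
--
-- def _outcome_val(row: dict) -> str:
--     return (row.get("outcome") or row.get("end_reason") or "").strip()
--
-- def _is_timeout(row: dict) -> bool:
--     return _outcome_val(row).upper() == "TIMEOUT"
--
-- def _is_non_timeout(row: dict) -> bool:
--     return _outcome_val(row) in NON_TIMEOUT_OUTCOMES
--
-- def _resolve_duplicates(rows):
--     # Streaming tournament: one pass keeps, per event_id, only
--     # [best_rank, winner_index, non_timeout_outcomes] -- no per-group row lists.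
--     agg = {}
--     for i, r in enumerate(rows):
--         eid = _event_id(r)
--         if not eid:
--             continue
--         rk = 0 if _is_non_timeout(r) else (1 if _is_timeout(r) else 2)
--         a = agg.get(eid)
--         if a is None:
--             a = agg[eid] = [rk, i, []]
--         elif rk < a[0]:
--             a[0], a[1] = rk, i
--         if rk == 0:
--             a[2].append(_outcome_val(r))
--
--     warnings = [
--         f"event_id={eid}: multiple non-TIMEOUT outcomes {nts} — skip group"
--         for eid, (_rk, _win, nts) in agg.items() if len(nts) > 1
--     ]
--
--     def kept(i, r):
--         eid = _event_id(r)
--         if not eid: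
--             return True
--         _rk, win, nts = agg[eid]
--         return len(nts) > 1 or i == win
--
--     rows_to_keep = [r for i, r in enumerate(rows) if kept(i, r)]
--     rows_to_drop = [r for i, r in enumerate(rows) if not kept(i, r)]
--     return rows_to_keep, rows_to_drop, warnings
-- ===== Notes on version B (the rewrite author's own statement) =====
-- stated objective: alternative
-- what changed: A groups rows into per-event item lists and then runs three filters plus a four-branch keep/drop index-set case analysis per group; B is a streaming tournament: one pass keeps per event only (best_rank, winner_index, non_timeout_outcomes), warnings are a comprehension over those aggregates, and each row is kept by a direct predicate (no event id, warned group, or winner) - no per-group row lists, no keep/drop index sets, no filters.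
import Mathlib
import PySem

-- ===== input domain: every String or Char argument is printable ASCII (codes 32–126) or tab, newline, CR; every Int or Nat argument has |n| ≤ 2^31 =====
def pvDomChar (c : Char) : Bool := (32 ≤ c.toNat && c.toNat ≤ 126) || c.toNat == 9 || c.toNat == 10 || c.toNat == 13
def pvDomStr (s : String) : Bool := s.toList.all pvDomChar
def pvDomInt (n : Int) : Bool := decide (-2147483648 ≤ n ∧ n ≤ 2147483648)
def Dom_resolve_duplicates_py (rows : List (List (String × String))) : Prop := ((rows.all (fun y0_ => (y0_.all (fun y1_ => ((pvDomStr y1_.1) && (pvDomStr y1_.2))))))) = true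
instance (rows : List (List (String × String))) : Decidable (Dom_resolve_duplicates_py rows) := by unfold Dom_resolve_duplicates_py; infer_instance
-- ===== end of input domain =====

-- B replaces A's per-event item lists + three filters + four-branch keep/drop index-set
-- bookkeeping by a single streaming tournament (per event only best_rank/winner/non-timeout
-- outcomes are kept) and a direct per-row keep predicate; objective: alternative.

-- ===== PORT A =====
-- shared module helpers (_event_id, _outcome_val, _is_timeout, _is_non_timeout) — identical in both Pythons

-- `x or y` on str-or-None: truthy = some non-empty string
def pvOrStr (a b : Option String) : Option String :=
  match a with
  | some s => if s = "" then b else some s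
  | none => b

def pvEventId (row : List (String × String)) : String :=
  PySem.Str.strip ((pvOrStr ((PySem.Dict.mk row).get? "event_id") ((PySem.Dict.mk row).get? "eventId")).getD "")

def pvOutcomeVal (row : List (String × String)) : String :=
  PySem.Str.strip ((pvOrStr ((PySem.Dict.mk row).get? "outcome") ((PySem.Dict.mk row).get? "end_reason")).getD "")

def pvIsTimeout (row : List (String × String)) : Bool :=
  PySem.Str.upper (pvOutcomeVal row) == "TIMEOUT"

def pvIsNonTimeout (row : List (String × String)) : Bool :=
  pvOutcomeVal row == "TP_hit" || pvOutcomeVal row == "SL_hit"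

-- repr(s) for a Python str over printable ASCII + tab/newline/CR (exact on that domain):
-- single quotes unless s contains ' and no "; backslash, the delimiter, \t, \n, \r escaped
def pvReprEscape (q c : Char) : List Char :=
  if c = '\\' then ['\\', '\\']
  else if c = q then ['\\', q]
  else if c = '\t' then ['\\', 't']
  else if c = '\n' then ['\\', 'n']
  else if c = '\r' then ['\\', 'r']
  else [c]

def pvReprStr (s : String) : List Char :=
  let cs := s.toList
  let q : Char := if cs.contains '\'' && !(cs.contains '"') then '"' else '\''
  [q] ++ cs.flatMap (pvReprEscape q) ++ [q]

-- the f-string "event_id={eid}: multiple non-TIMEOUT outcomes {outs} — skip group" (identical in A and B)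
def pvWarnStr (eid : String) (outs : List String) : String :=
  String.ofList ("event_id=".toList ++ eid.toList ++ ": multiple non-TIMEOUT outcomes ".toList
    ++ ['['] ++ PySem.Chars.join [',', ' '] (outs.map pvReprStr) ++ [']']
    ++ " — skip group".toList)

-- A formats [_outcome_val(r) for _, r in non_timeout]
def pvWarnMsg (eid : String) (nt : List (Int × List (String × String))) : String :=
  pvWarnStr eid (nt.map (fun p => pvOutcomeVal p.2))

-- A's grouping loop body: defaultdict append / no-event set add
def pvGroupStepA
    (st : PySem.Dict String (List (Int × List (String × String))) × PySem.Set Int)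
    (ir : Int × List (String × String)) :
    PySem.Dict String (List (Int × List (String × String))) × PySem.Set Int :=
  let eid := pvEventId ir.2
  if eid ≠ "" then (st.1.insert eid (st.1.getD eid [] ++ [ir]), st.2)
  else (st.1, PySem.Set.add st.2 ir.1)

-- A's main loop body over by_event.items(); state = (keep_indices, drop_indices, warnings)
def pvMainStepA
    (st : PySem.Set Int × PySem.Set Int × List String)
    (p : String × List (Int × List (String × String))) :
    PySem.Set Int × PySem.Set Int × List String :=
  let items := p.2
  if items.length ≤ 1 then
    (match items with        -- items[0][0]; group lists are never empty (totality guard)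
     | x :: _ => (PySem.Set.add st.1 x.1, st.2.1, st.2.2)
     | [] => st)
  else
    let nt := items.filter (fun ir => pvIsNonTimeout ir.2)
    let tmo := items.filter (fun ir => pvIsTimeout ir.2)
    let oth := items.filter (fun ir => !pvIsNonTimeout ir.2 && !pvIsTimeout ir.2)
    if nt.length > 1 then
      (PySem.Set.update st.1 (items.map (·.1)), st.2.1, st.2.2 ++ [pvWarnMsg p.1 nt])
    else if h : nt ≠ [] then
      let drop := PySem.Set.update st.2.1 (tmo.map (·.1))
      (PySem.Set.add st.1 (nt.head h).1,
       if oth ≠ [] then PySem.Set.update drop (oth.map (·.1)) else drop, st.2.2)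
    else if h : tmo ≠ [] then
      let drop := PySem.Set.update st.2.1 (tmo.tail.map (·.1))
      (PySem.Set.add st.1 (tmo.head h).1,
       if oth ≠ [] then PySem.Set.update drop (oth.map (·.1)) else drop, st.2.2)
    else if h : oth ≠ [] then
      (PySem.Set.add st.1 (oth.head h).1, PySem.Set.update st.2.1 (oth.tail.map (·.1)), st.2.2)
    else st

def resolve_duplicates_py (rows : List (List (String × String))) :
    (List (List (String × String))) × (List (List (String × String))) × List String :=
  let en := PySem.List.enumerate rows
  let g := en.foldl pvGroupStepA (PySem.Dict.empty, PySem.Set.empty)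
  let st := g.1.items.foldl pvMainStepA (PySem.Set.ofList g.2, PySem.Set.empty, [])
  let drop := st.2.1
  ((en.filter (fun ir => !(PySem.Set.contains drop ir.1))).map (·.2),
   (en.filter (fun ir => PySem.Set.contains drop ir.1)).map (·.2),
   st.2.2)

-- ===== PORT B =====
-- rk = 0 if _is_non_timeout(r) else (1 if _is_timeout(r) else 2)
def pvRank (r : List (String × String)) : Int :=
  if pvIsNonTimeout r then 0 else if pvIsTimeout r then 1 else 2

-- the net effect of B's loop body on the aggregate [best_rank, winner_index, nt_outcomes] at eid
def pvAggUpd (o : Option (Int × Int × List String)) (ir : Int × List (String × String)) :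
    Int × Int × List String :=
  let rk := pvRank ir.2
  let a : Int × Int × List String :=
    match o with
    | none => (rk, ir.1, [])
    | some a => if rk < a.1 then (rk, ir.1, a.2.2) else a
  if rk = 0 then (a.1, a.2.1, a.2.2 ++ [pvOutcomeVal ir.2]) else a

-- B's single streaming pass
def pvAggStep (d : PySem.Dict String (Int × Int × List String))
    (ir : Int × List (String × String)) : PySem.Dict String (Int × Int × List String) :=
  if pvEventId ir.2 = "" then d
  else d.insert (pvEventId ir.2) (pvAggUpd (d.get? (pvEventId ir.2)) ir)

-- kept(i, r)
def pvKept (agg : PySem.Dict String (Int × Int × List String))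
    (ir : Int × List (String × String)) : Bool :=
  if pvEventId ir.2 = "" then true
  else
    match agg.get? (pvEventId ir.2) with
    | some a => decide (1 < a.2.2.length) || ir.1 == a.2.1
    | none => true   -- unreachable: every non-empty event_id was inserted by the pass

def resolve_duplicates_py_alt (rows : List (List (String × String))) :
    (List (List (String × String))) × (List (List (String × String))) × List String :=
  let en := PySem.List.enumerate rows
  let agg := en.foldl pvAggStep PySem.Dict.empty
  let warnings := (agg.items.filter (fun p => decide (1 < p.2.2.2.length))).map
    (fun p => pvWarnStr p.1 p.2.2.2)
  ((en.filter (fun ir => pvKept agg ir)).map (·.2),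
   (en.filter (fun ir => !pvKept agg ir)).map (·.2),
   warnings)

-- ===== PRECONDITION & SPEC =====
def Spec_resolve_duplicates_py (rows : List (List (String × String))) (out : (List (List (String × String))) × (List (List (String × String))) × List String) : Prop := out = resolve_duplicates_py_alt rows
instance (rows : List (List (String × String))) (out : (List (List (String × String))) × (List (List (String × String))) × List String) : Decidable (Spec_resolve_duplicates_py rows out) := by unfold Spec_resolve_duplicates_py; infer_instance

-- ===== CLAIM (what is proved, stated in full; the proofs are below) =====
def Claim_equal_resolve_duplicates_py : Prop := ∀ (rows : List (List (String × String))), Dom_resolve_duplicates_py rows → Spec_resolve_duplicates_py rows (resolve_duplicates_py rows)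

-- ===== LEMMAS AND PROOFS =====

-- ---------- proof-side abbreviations ----------

-- the unguarded loop bodies (the guard `eid != ""` is factored into a filter)
def pvIns (d : PySem.Dict String (List (Int × List (String × String))))
    (ir : Int × List (String × String)) : PySem.Dict String (List (Int × List (String × String))) :=
  d.insert (pvEventId ir.2) (d.getD (pvEventId ir.2) [] ++ [ir])

def pvAggIns (d : PySem.Dict String (Int × Int × List String))
    (ir : Int × List (String × String)) : PySem.Dict String (Int × Int × List String) :=
  d.insert (pvEventId ir.2) (pvAggUpd (d.get? (pvEventId ir.2)) ir)

def pvNT (l : List (Int × List (String × String))) : List (Int × List (String × String)) :=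
  l.filter (fun ir => pvIsNonTimeout ir.2)

def pvTM (l : List (Int × List (String × String))) : List (Int × List (String × String)) :=
  l.filter (fun ir => pvIsTimeout ir.2)

def pvOT (l : List (Int × List (String × String))) : List (Int × List (String × String)) :=
  l.filter (fun ir => !pvIsNonTimeout ir.2 && !pvIsTimeout ir.2)

def pvArgmin (l : List (Int × List (String × String))) (p : Int × Int) : Int × Int :=
  l.foldl (fun p ir => if pvRank ir.2 < p.1 then (pvRank ir.2, ir.1) else p) p

def pvWinIdx (items : List (Int × List (String × String))) : Int :=
  match pvNT items ++ (pvTM items ++ pvOT items) with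
  | x :: _ => x.1
  | [] => 0

def pvDropIdx (items : List (Int × List (String × String))) : List Int :=
  if items.length ≤ 1 then []
  else if 1 < (pvNT items).length then []
  else (items.filter (fun ir => ir.1 != pvWinIdx items)).map (·.1)

def pvWarnOf (p : String × List (Int × List (String × String))) : List String :=
  if p.2.length ≤ 1 then []
  else if 1 < (pvNT p.2).length then [pvWarnMsg p.1 (pvNT p.2)] else []

-- ---------- generic small lemmas ----------

-- factor the `if eid == "" : continue` guard of a fold into a filter
theorem pvFoldl_guard {σ : Type} (l : List (Int × List (String × String)))
    (F : σ → Int × List (String × String) → σ) (d : σ) :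
    l.foldl (fun d ir => if pvEventId ir.2 = "" then d else F d ir) d
      = (l.filter (fun ir => pvEventId ir.2 != "")).foldl F d := by
  induction l generalizing d with
  | nil => rfl
  | cons x l ih =>
      simp only [List.foldl_cons, List.filter_cons]
      by_cases h : pvEventId x.2 = "" <;> simp [h, ih]

-- ---------- A's grouping fold ----------

theorem pvGroupA_fst (l : List (Int × List (String × String)))
    (d : PySem.Dict String (List (Int × List (String × String)))) (s : PySem.Set Int) :
    (l.foldl pvGroupStepA (d, s)).1
      = l.foldl (fun d ir => if pvEventId ir.2 = "" then d else pvIns d ir) d := by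
  induction l generalizing d s with
  | nil => rfl
  | cons x l ih =>
      simp only [List.foldl_cons]
      by_cases h : pvEventId x.2 = ""
      · rw [show pvGroupStepA (d, s) x = (d, PySem.Set.add s x.1) by simp [pvGroupStepA, h]]
        rw [if_pos h]
        exact ih d _
      · rw [show pvGroupStepA (d, s) x = (pvIns d x, s) by simp [pvGroupStepA, pvIns, h]]
        rw [if_neg h]
        exact ih (pvIns d x) s

theorem pvGetD_group (l : List (Int × List (String × String)))
    (d : PySem.Dict String (List (Int × List (String × String)))) (e : String) :
    (l.foldl pvIns d).getD e [] = d.getD e [] ++ l.filter (fun ir => pvEventId ir.2 == e) := by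
  induction l generalizing d with
  | nil => simp
  | cons x l ih =>
      simp only [List.foldl_cons, List.filter_cons]
      rw [ih]
      by_cases h : pvEventId x.2 = e
      · simp [pvIns, h]
      · simp [pvIns, PySem.Dict.getD_insert, h, Ne.symm h]

-- ---------- B's aggregation fold ----------

theorem pvGet?_agg (l : List (Int × List (String × String)))
    (d : PySem.Dict String (Int × Int × List String)) (e : String) :
    (l.foldl pvAggIns d).get? e
      = (l.filter (fun ir => pvEventId ir.2 == e)).foldl
          (fun o ir => some (pvAggUpd o ir)) (d.get? e) := by
  induction l generalizing d with
  | nil => rfl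
  | cons x l ih =>
      simp only [List.foldl_cons, List.filter_cons]
      rw [ih]
      by_cases h : pvEventId x.2 = e
      · simp [pvAggIns, h]
      · simp [pvAggIns, PySem.Dict.get?_insert, h, Ne.symm h]

theorem pvRank_nonneg (r : List (String × String)) : 0 ≤ pvRank r := by
  unfold pvRank; split_ifs <;> omega

theorem pvRank_lt_three (r : List (String × String)) : pvRank r < 3 := by
  unfold pvRank; split_ifs <;> omega

theorem pvRank_eq_zero_iff (r : List (String × String)) :
    pvRank r = 0 ↔ pvIsNonTimeout r = true := by
  unfold pvRank
  by_cases h1 : pvIsNonTimeout r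
  · simp [h1]
  · simp only [h1, Bool.false_eq_true, if_false]
    split_ifs <;> simp

theorem pvRank_pos_of_not_nt (r : List (String × String)) (h : pvIsNonTimeout r = false) :
    1 ≤ pvRank r := by
  unfold pvRank
  split_ifs with hh h2
  · simp [h] at hh
  · omega
  · omega

theorem pvRank_eq_one (r : List (String × String)) (h1 : pvIsNonTimeout r = false)
    (h2 : pvIsTimeout r = true) : pvRank r = 1 := by
  unfold pvRank; rw [h1, h2]; simp

theorem pvRank_eq_two (r : List (String × String)) (h1 : pvIsNonTimeout r = false)
    (h2 : pvIsTimeout r = false) : pvRank r = 2 := by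
  unfold pvRank; rw [h1, h2]; simp

theorem pvNT_false_of_rank_ne_zero (r : List (String × String)) (h : pvRank r ≠ 0) :
    pvIsNonTimeout r = false := by
  cases hb : pvIsNonTimeout r
  · rfl
  · exact absurd ((pvRank_eq_zero_iff r).mpr hb) h

theorem pvAggUpd_fst (a : Int × Int × List String) (ir : Int × List (String × String)) :
    (pvAggUpd (some a) ir).1 = if pvRank ir.2 < a.1 then pvRank ir.2 else a.1 := by
  simp only [pvAggUpd]; split_ifs <;> rfl

theorem pvAggUpd_win (a : Int × Int × List String) (ir : Int × List (String × String)) :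
    (pvAggUpd (some a) ir).2.1 = if pvRank ir.2 < a.1 then ir.1 else a.2.1 := by
  simp only [pvAggUpd]; split_ifs <;> rfl

theorem pvAggUpd_third (a : Int × Int × List String) (ir : Int × List (String × String)) :
    (pvAggUpd (some a) ir).2.2
      = a.2.2 ++ if pvIsNonTimeout ir.2 then [pvOutcomeVal ir.2] else [] := by
  by_cases h : pvRank ir.2 = 0
  · rw [if_pos ((pvRank_eq_zero_iff ir.2).mp h)]
    simp only [pvAggUpd, h, if_true]
    split_ifs <;> rfl
  · rw [if_neg (by simp [pvNT_false_of_rank_ne_zero ir.2 h])]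
    simp only [pvAggUpd, if_neg h]
    split_ifs <;> simp

set_option maxHeartbeats 1600000 in
theorem pvAggFold_some (l : List (Int × List (String × String))) (a : Int × Int × List String) :
    l.foldl (fun o ir => some (pvAggUpd o ir)) (some a)
      = some ((pvArgmin l (a.1, a.2.1)).1, (pvArgmin l (a.1, a.2.1)).2,
              a.2.2 ++ (pvNT l).map (fun ir => pvOutcomeVal ir.2)) := by
  induction l generalizing a with
  | nil => simp [pvArgmin, pvNT]
  | cons x l ih =>
      simp only [List.foldl_cons]
      rw [ih]
      have h1 := pvAggUpd_fst a x
      have h2 := pvAggUpd_win a x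
      have h3 := pvAggUpd_third a x
      congr 1
      have harg : pvArgmin (x :: l) (a.1, a.2.1)
          = pvArgmin l ((pvAggUpd (some a) x).1, (pvAggUpd (some a) x).2.1) := by
        simp only [pvArgmin, List.foldl_cons, h1, h2]
        split_ifs <;> rfl
      rw [harg]
      refine congrArg₂ _ rfl (congrArg₂ _ rfl ?_)
      rw [h3]
      simp only [pvNT, List.filter_cons]
      by_cases h : pvIsNonTimeout x.2 <;> simp [h]

set_option maxHeartbeats 1600000 in
theorem pvAggFold_none (v : Int × List (String × String))
    (vt : List (Int × List (String × String))) :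
    (v :: vt).foldl (fun o ir => some (pvAggUpd o ir)) none
      = some ((pvArgmin (v :: vt) (3, 0)).1, (pvArgmin (v :: vt) (3, 0)).2,
              (pvNT (v :: vt)).map (fun ir => pvOutcomeVal ir.2)) := by
  have hlt := pvRank_lt_three v.2
  have hinit : pvAggUpd none v
      = ((pvAggUpd none v).1, (pvAggUpd none v).2.1, (pvAggUpd none v).2.2) := rfl
  simp only [List.foldl_cons]
  rw [pvAggFold_some]
  have hfst : (pvAggUpd none v).1 = pvRank v.2 := by
    simp only [pvAggUpd]; split_ifs <;> rfl
  have hwin : (pvAggUpd none v).2.1 = v.1 := by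
    simp only [pvAggUpd]; split_ifs <;> rfl
  have hthird : (pvAggUpd none v).2.2 = if pvIsNonTimeout v.2 then [pvOutcomeVal v.2] else [] := by
    by_cases h : pvRank v.2 = 0
    · rw [if_pos ((pvRank_eq_zero_iff v.2).mp h)]
      simp [pvAggUpd, h]
    · rw [if_neg (by simp [pvNT_false_of_rank_ne_zero v.2 h])]
      simp [pvAggUpd, h]
  have harg : pvArgmin (v :: vt) (3, 0) = pvArgmin vt (pvRank v.2, v.1) := by
    simp only [pvArgmin, List.foldl_cons, if_pos hlt]
  rw [hfst, hwin, hthird, harg]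
  congr 1
  simp only [pvNT, List.filter_cons]
  by_cases h : pvIsNonTimeout v.2 <;> simp [h]

-- ---------- argmin characterization ----------

theorem pvArgmin_fix (l : List (Int × List (String × String))) (p : Int × Int)
    (h : ∀ ir ∈ l, ¬ (pvRank ir.2 < p.1)) : pvArgmin l p = p := by
  induction l with
  | nil => rfl
  | cons x l ih =>
      simp only [pvArgmin, List.foldl_cons, if_neg (h x List.mem_cons_self)]
      exact ih (fun ir hir => h ir (List.mem_cons_of_mem x hir))

theorem pvArgmin_nt (l : List (Int × List (String × String)))
    (w : Int × List (String × String)) (ws : List (Int × List (String × String)))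
    (h : pvNT l = w :: ws) :
    ∀ p : Int × Int, 1 ≤ p.1 → pvArgmin l p = (0, w.1) := by
  induction l with
  | nil => simp [pvNT] at h
  | cons x l ih =>
      intro p hp
      simp only [pvNT, List.filter_cons] at h
      by_cases hx : pvIsNonTimeout x.2
      · rw [if_pos hx] at h
        obtain ⟨hw, -⟩ := List.cons.inj h
        have hr : pvRank x.2 = 0 := (pvRank_eq_zero_iff x.2).mpr hx
        simp only [pvArgmin, List.foldl_cons, hr, if_pos (by omega : (0:Int) < p.1)]
        rw [show (List.foldl _ ((0:Int), x.1) l) = pvArgmin l (0, x.1) from rfl]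
        rw [pvArgmin_fix l (0, x.1) (fun ir _ => by have := pvRank_nonneg ir.2; simp; omega), hw]
      · rw [if_neg hx] at h
        have hr1 : 1 ≤ pvRank x.2 := pvRank_pos_of_not_nt x.2 (by simpa using hx)
        simp only [pvArgmin, List.foldl_cons]
        split_ifs with hlt
        · exact ih h (pvRank x.2, x.1) hr1
        · exact ih h p hp

theorem pvArgmin_tm (l : List (Int × List (String × String)))
    (w : Int × List (String × String)) (ws : List (Int × List (String × String)))
    (hnt : pvNT l = []) (h : pvTM l = w :: ws) :
    ∀ p : Int × Int, 2 ≤ p.1 → pvArgmin l p = (1, w.1) := by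
  induction l with
  | nil => simp [pvTM] at h
  | cons x l ih =>
      intro p hp
      simp only [pvNT, List.filter_cons] at hnt
      have hxnt : pvIsNonTimeout x.2 = false := by
        cases hb : pvIsNonTimeout x.2
        · rfl
        · rw [if_pos hb] at hnt; exact absurd hnt (List.cons_ne_nil _ _)
      rw [if_neg (by simp [hxnt])] at hnt
      simp only [pvTM, List.filter_cons] at h
      by_cases hx : pvIsTimeout x.2
      · rw [if_pos hx] at h
        obtain ⟨hw, -⟩ := List.cons.inj h
        have hr : pvRank x.2 = 1 := pvRank_eq_one x.2 hxnt hx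
        simp only [pvArgmin, List.foldl_cons, hr, if_pos (by omega : (1:Int) < p.1)]
        rw [show (List.foldl _ ((1:Int), x.1) l) = pvArgmin l (1, x.1) from rfl]
        have hge : ∀ ir ∈ l, ¬ (pvRank ir.2 < 1) := by
          intro ir hir
          have : pvIsNonTimeout ir.2 = false := by
            cases hb : pvIsNonTimeout ir.2
            · rfl
            · exact absurd hb (by simpa using (List.filter_eq_nil_iff.mp hnt ir hir))
          have := pvRank_pos_of_not_nt ir.2 this
          omega
        rw [pvArgmin_fix l (1, x.1) hge, hw]
      · rw [if_neg hx] at h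
        have hr : pvRank x.2 = 2 := pvRank_eq_two x.2 hxnt (by simpa using hx)
        simp only [pvArgmin, List.foldl_cons]
        split_ifs with hlt
        · rw [hr]; exact ih hnt h (2, x.1) (by omega)
        · exact ih hnt h p hp

theorem pvArgmin_ot (l : List (Int × List (String × String)))
    (w : Int × List (String × String)) (ws : List (Int × List (String × String)))
    (hnt : pvNT l = []) (htm : pvTM l = []) (hl : l = w :: ws) :
    pvArgmin l (3, 0) = (2, w.1) := by
  subst hl
  have hwnt : pvIsNonTimeout w.2 = false := by
    cases hb : pvIsNonTimeout w.2
    · rfl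
    · exact absurd hb (by simpa using (List.filter_eq_nil_iff.mp hnt w List.mem_cons_self))
  have hwtm : pvIsTimeout w.2 = false := by
    cases hb : pvIsTimeout w.2
    · rfl
    · exact absurd hb (by simpa using (List.filter_eq_nil_iff.mp htm w List.mem_cons_self))
  have hr : pvRank w.2 = 2 := pvRank_eq_two w.2 hwnt hwtm
  simp only [pvArgmin, List.foldl_cons, hr, if_pos (by omega : (2:Int) < 3)]
  rw [show (List.foldl _ ((2:Int), w.1) ws) = pvArgmin ws (2, w.1) from rfl]
  apply pvArgmin_fix
  intro ir hir
  have h1 : pvIsNonTimeout ir.2 = false := by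
    cases hb : pvIsNonTimeout ir.2
    · rfl
    · exact absurd hb (by simpa using (List.filter_eq_nil_iff.mp hnt ir (List.mem_cons_of_mem w hir)))
  have h2 : pvIsTimeout ir.2 = false := by
    cases hb : pvIsTimeout ir.2
    · rfl
    · exact absurd hb (by simpa using (List.filter_eq_nil_iff.mp htm ir (List.mem_cons_of_mem w hir)))
  rw [pvRank_eq_two ir.2 h1 h2]
  omega

theorem pvWin_eq (items : List (Int × List (String × String))) (h : items ≠ []) :
    (pvArgmin items (3, 0)).2 = pvWinIdx items := by
  cases hnt : pvNT items with
  | cons w ws =>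
      rw [pvArgmin_nt items w ws hnt (3, 0) (by norm_num)]
      simp [pvWinIdx, hnt]
  | nil =>
      cases htm : pvTM items with
      | cons w ws =>
          rw [pvArgmin_tm items w ws hnt htm (3, 0) (by norm_num)]
          simp [pvWinIdx, hnt, htm]
      | nil =>
          obtain ⟨w, ws, hl⟩ := List.exists_cons_of_ne_nil h
          subst hl
          rw [pvArgmin_ot (w :: ws) w ws hnt htm rfl]
          have hot : pvOT (w :: ws) = w :: ws := by
            apply List.filter_eq_self.mpr
            intro a ha
            have h1 := List.filter_eq_nil_iff.mp hnt a ha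
            have h2 := List.filter_eq_nil_iff.mp htm a ha
            simp at h1 h2
            simp [h1, h2]
          simp [pvWinIdx, hnt, htm, hot]

-- ---------- facts about the three classes ----------

-- a row cannot be both non-timeout and timeout
theorem pvDisj (r : List (String × String)) (h : pvIsNonTimeout r = true) : pvIsTimeout r = false := by
  unfold pvIsNonTimeout at h
  unfold pvIsTimeout
  rcases Bool.or_eq_true_iff.mp h with h' | h' <;>
    rw [show pvOutcomeVal r = _ from eq_of_beq h'] <;> decide

-- index-membership in a filtered group
theorem pvMemIdx {α : Type} (l : List (Int × α)) (p : Int × α → Bool) (x : Int) :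
    x ∈ (l.filter p).map Prod.fst ↔ ∃ r, (x, r) ∈ l ∧ p (x, r) = true := by
  simp only [List.mem_map, List.mem_filter]
  constructor
  · rintro ⟨⟨i, r⟩, ⟨hl, hp⟩, h1⟩
    exact ⟨r, by simpa [← h1] using hl, by simpa [← h1] using hp⟩
  · rintro ⟨r, hl, hp⟩
    exact ⟨(x, r), ⟨hl, hp⟩, rfl⟩

-- with a unique non-timeout row v, dropping timeout∪other = dropping everything but v's index
theorem pvCase_nt (items : List (Int × List (String × String))) (v : Int × List (String × String))
    (hnd : (items.map Prod.fst).Nodup)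
    (hnt : items.filter (fun ir => pvIsNonTimeout ir.2) = [v]) (x : Int) :
    (x ∈ (items.filter (fun ir => pvIsTimeout ir.2)).map Prod.fst ∨
     x ∈ (items.filter (fun ir => !pvIsNonTimeout ir.2 && !pvIsTimeout ir.2)).map Prod.fst)
    ↔ x ∈ (items.filter (fun ir => ir.1 != v.1)).map Prod.fst := by
  have hvmem : v ∈ items ∧ pvIsNonTimeout v.2 = true := by
    have : v ∈ items.filter (fun ir => pvIsNonTimeout ir.2) := by simp [hnt]
    exact ⟨(List.mem_filter.mp this).1, (List.mem_filter.mp this).2⟩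
  rw [pvMemIdx, pvMemIdx, pvMemIdx]
  constructor
  · rintro (⟨r, hl, hp⟩ | ⟨r, hl, hp⟩) <;>
    · refine ⟨r, hl, ?_⟩
      simp only [bne_iff_ne, ne_eq]
      intro hx
      have : (x, r) = v := List.inj_on_of_nodup_map hnd hl hvmem.1 hx
      have hr : r = v.2 := congrArg Prod.snd this
      rw [hr] at hp
      simp [pvDisj v.2 hvmem.2, hvmem.2] at hp
  · rintro ⟨r, hl, hp⟩
    simp only [bne_iff_ne, ne_eq] at hp
    cases hP : pvIsNonTimeout r with
    | true =>
        exfalso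
        have : (x, r) ∈ items.filter (fun ir => pvIsNonTimeout ir.2) :=
          List.mem_filter.mpr ⟨hl, hP⟩
        rw [hnt, List.mem_singleton] at this
        exact hp (congrArg Prod.fst this)
    | false =>
        cases hT : pvIsTimeout r with
        | true => exact Or.inl ⟨r, hl, hT⟩
        | false => exact Or.inr ⟨r, hl, by simp [hP, hT]⟩

-- no non-timeout rows, first timeout row v wins: dropping tail-of-timeout∪other = dropping all but v
theorem pvCase_tmo (items : List (Int × List (String × String))) (v : Int × List (String × String))
    (vt : List (Int × List (String × String)))
    (hnd : (items.map Prod.fst).Nodup)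
    (hnt : items.filter (fun ir => pvIsNonTimeout ir.2) = [])
    (htmo : items.filter (fun ir => pvIsTimeout ir.2) = v :: vt) (x : Int) :
    (x ∈ vt.map Prod.fst ∨
     x ∈ (items.filter (fun ir => !pvIsNonTimeout ir.2 && !pvIsTimeout ir.2)).map Prod.fst)
    ↔ x ∈ (items.filter (fun ir => ir.1 != v.1)).map Prod.fst := by
  have hsub : (v :: vt).Sublist items := htmo ▸ List.filter_sublist (l := items)
  have htnd : ((v :: vt).map Prod.fst).Nodup := (hsub.map Prod.fst).nodup hnd
  have hvmem : v ∈ items ∧ pvIsTimeout v.2 = true := by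
    have : v ∈ items.filter (fun ir => pvIsTimeout ir.2) := by simp [htmo]
    exact ⟨(List.mem_filter.mp this).1, (List.mem_filter.mp this).2⟩
  rw [pvMemIdx, pvMemIdx]
  constructor
  · rintro (hx | ⟨r, hl, hp⟩)
    · rw [List.mem_map] at hx
      obtain ⟨⟨i, r⟩, hivt, h1⟩ := hx
      subst h1
      have hlitems : (i, r) ∈ items := hsub.subset (List.mem_cons_of_mem v hivt)
      refine ⟨r, hlitems, ?_⟩
      simp only [bne_iff_ne, ne_eq]
      intro hx
      have : ((i, r) : Int × List (String × String)).1 ∉ vt.map Prod.fst := by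
        rw [hx]
        exact (List.nodup_cons.mp htnd).1
      exact this (List.mem_map.mpr ⟨(i, r), hivt, rfl⟩)
    · refine ⟨r, hl, ?_⟩
      simp only [bne_iff_ne, ne_eq]
      intro hx
      have : (x, r) = v := List.inj_on_of_nodup_map hnd hl hvmem.1 hx
      have hr : r = v.2 := congrArg Prod.snd this
      rw [hr] at hp
      simp [hvmem.2] at hp
  · rintro ⟨r, hl, hp⟩
    simp only [bne_iff_ne, ne_eq] at hp
    cases hP : pvIsNonTimeout r with
    | true =>
        exfalso
        have : (x, r) ∈ items.filter (fun ir => pvIsNonTimeout ir.2) :=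
          List.mem_filter.mpr ⟨hl, hP⟩
        simp [hnt] at this
    | false =>
        cases hT : pvIsTimeout r with
        | true =>
            have : (x, r) ∈ v :: vt := htmo ▸ List.mem_filter.mpr ⟨hl, hT⟩
            rcases List.mem_cons.mp this with h | h
            · exact absurd (congrArg Prod.fst h) hp
            · exact Or.inl (List.mem_map.mpr ⟨(x, r), h, rfl⟩)
        | false => exact Or.inr ⟨r, hl, by simp [hP, hT]⟩

-- only 'other' rows, first one v wins
theorem pvCase_oth (items : List (Int × List (String × String))) (v : Int × List (String × String))
    (vt : List (Int × List (String × String)))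
    (hnd : (items.map Prod.fst).Nodup)
    (hnt : items.filter (fun ir => pvIsNonTimeout ir.2) = [])
    (htmo : items.filter (fun ir => pvIsTimeout ir.2) = [])
    (hoth : items.filter (fun ir => !pvIsNonTimeout ir.2 && !pvIsTimeout ir.2) = v :: vt) (x : Int) :
    x ∈ vt.map Prod.fst ↔ x ∈ (items.filter (fun ir => ir.1 != v.1)).map Prod.fst := by
  have hsub : (v :: vt).Sublist items := hoth ▸ List.filter_sublist (l := items)
  have htnd : ((v :: vt).map Prod.fst).Nodup := (hsub.map Prod.fst).nodup hnd
  rw [pvMemIdx]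
  constructor
  · intro hx
    rw [List.mem_map] at hx
    obtain ⟨⟨i, r⟩, hivt, h1⟩ := hx
    subst h1
    refine ⟨r, hsub.subset (List.mem_cons_of_mem v hivt), ?_⟩
    simp only [bne_iff_ne, ne_eq]
    intro hx
    have : ((i, r) : Int × List (String × String)).1 ∉ vt.map Prod.fst := by
      rw [hx]; exact (List.nodup_cons.mp htnd).1
    exact this (List.mem_map.mpr ⟨(i, r), hivt, rfl⟩)
  · rintro ⟨r, hl, hp⟩
    simp only [bne_iff_ne, ne_eq] at hp
    cases hP : pvIsNonTimeout r with
    | true =>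
        exfalso
        have : (x, r) ∈ items.filter (fun ir => pvIsNonTimeout ir.2) :=
          List.mem_filter.mpr ⟨hl, hP⟩
        simp [hnt] at this
    | false =>
        cases hT : pvIsTimeout r with
        | true =>
            exfalso
            have : (x, r) ∈ items.filter (fun ir => pvIsTimeout ir.2) :=
              List.mem_filter.mpr ⟨hl, hT⟩
            simp [htmo] at this
        | false =>
            have : (x, r) ∈ v :: vt := hoth ▸ List.mem_filter.mpr ⟨hl, by simp [hP, hT]⟩
            rcases List.mem_cons.mp this with h | h
            · exact absurd (congrArg Prod.fst h) hp
            · exact List.mem_map.mpr ⟨(x, r), h, rfl⟩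

theorem pvDropIdx_sub (items : List (Int × List (String × String))) (x : Int)
    (h : x ∈ pvDropIdx items) : x ∈ items.map Prod.fst := by
  unfold pvDropIdx at h
  split_ifs at h with h1 h2
  · simp at h
  · simp at h
  · rw [pvMemIdx] at h
    obtain ⟨r, hl, -⟩ := h
    exact List.mem_map.mpr ⟨(x, r), hl, rfl⟩

theorem pvWarnOf_eq (p : String × List (Int × List (String × String))) :
    pvWarnOf p = if 1 < (pvNT p.2).length then [pvWarnMsg p.1 (pvNT p.2)] else [] := by
  unfold pvWarnOf
  split_ifs with h1 h2 h3
  · exact absurd (Nat.lt_of_lt_of_le h2 (List.length_filter_le _ _)) (by omega)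
  · rfl
  · rfl
  · rfl

-- ---------- A's main fold: drop-set membership and warnings ----------

set_option maxHeartbeats 1000000 in
theorem pvStepA_spec (st : PySem.Set Int × PySem.Set Int × List String)
    (p : String × List (Int × List (String × String)))
    (hnd : (p.2.map Prod.fst).Nodup) :
    (∀ x : Int, x ∈ (pvMainStepA st p).2.1 ↔ x ∈ st.2.1 ∨ x ∈ pvDropIdx p.2)
    ∧ (pvMainStepA st p).2.2 = st.2.2 ++ pvWarnOf p := by
  obtain ⟨eid, items⟩ := p
  simp only at hnd
  simp only [pvMainStepA]
  by_cases hlen : items.length ≤ 1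
  · have hD : pvDropIdx items = [] := by unfold pvDropIdx; rw [if_pos hlen]
    have hW : pvWarnOf (eid, items) = [] := by unfold pvWarnOf; exact if_pos hlen
    rw [if_pos hlen]
    cases items with
    | nil => exact ⟨fun x => by simp [hD], by simp [hW]⟩
    | cons a t => exact ⟨fun x => by simp [hD], by simp [hW]⟩
  · rw [if_neg hlen]
    by_cases hnt2 : (items.filter (fun ir => pvIsNonTimeout ir.2)).length > 1
    · have hD : pvDropIdx items = [] := by
        unfold pvDropIdx; rw [if_neg hlen, if_pos (show 1 < (pvNT items).length from hnt2)]
      have hW : pvWarnOf (eid, items) = [pvWarnMsg eid (pvNT items)] := by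
        unfold pvWarnOf; rw [if_neg hlen, if_pos (show 1 < (pvNT items).length from hnt2)]
      rw [if_pos hnt2]
      exact ⟨fun x => by simp [hD], by rw [hW]; rfl⟩
    · rw [if_neg hnt2]
      have hnt2' : ¬ 1 < (pvNT items).length := hnt2
      cases hntC : items.filter (fun ir => pvIsNonTimeout ir.2) with
      | cons v vt =>
          have hvt : vt = [] := by
            rw [hntC] at hnt2
            simp only [List.length_cons, gt_iff_lt, not_lt] at hnt2
            exact List.length_eq_zero_iff.mp (by omega)
          subst hvt
          rw [dif_pos (List.cons_ne_nil v [])]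
          dsimp only
          have hwin : pvWinIdx items = v.1 := by
            simp [pvWinIdx, pvNT, hntC]
          have hD : pvDropIdx items = (items.filter (fun ir => ir.1 != v.1)).map (·.1) := by
            unfold pvDropIdx; rw [if_neg hlen, if_neg hnt2', hwin]
          have key := pvCase_nt items v hnd hntC
          refine ⟨fun x => ?_, by simp [pvWarnOf, hnt2']⟩
          rw [hD]
          by_cases ho : items.filter (fun ir => !pvIsNonTimeout ir.2 && !pvIsTimeout ir.2) = []
          · rw [if_neg (not_not_intro ho)]
            simp only [ho, List.map_nil, List.not_mem_nil, or_false] at key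
            simp only [PySem.Set.mem_update, key x]
          · rw [if_pos ho]
            simp only [PySem.Set.mem_update, ← key x]
            exact or_assoc
      | nil =>
          rw [dif_neg (not_not_intro rfl)]
          cases htmoC : items.filter (fun ir => pvIsTimeout ir.2) with
          | cons v vt =>
              rw [dif_pos (List.cons_ne_nil v vt)]
              dsimp only
              have hwin : pvWinIdx items = v.1 := by
                simp [pvWinIdx, pvNT, pvTM, hntC, htmoC]
              have hD : pvDropIdx items = (items.filter (fun ir => ir.1 != v.1)).map (·.1) := by
                unfold pvDropIdx; rw [if_neg hlen, if_neg hnt2', hwin]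
              have key := pvCase_tmo items v vt hnd hntC htmoC
              refine ⟨fun x => ?_, by simp [pvWarnOf, hnt2']⟩
              rw [hD]
              by_cases ho : items.filter (fun ir => !pvIsNonTimeout ir.2 && !pvIsTimeout ir.2) = []
              · rw [if_neg (not_not_intro ho)]
                simp only [ho, List.map_nil, List.not_mem_nil, or_false] at key
                simp only [PySem.Set.mem_update, List.tail_cons, key x]
              · rw [if_pos ho]
                simp only [PySem.Set.mem_update, List.tail_cons, ← key x]
                exact or_assoc
          | nil =>
              cases hothC : items.filter (fun ir => !pvIsNonTimeout ir.2 && !pvIsTimeout ir.2) with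
              | cons v vt =>
                  rw [dif_neg (not_not_intro rfl), dif_pos (List.cons_ne_nil v vt)]
                  dsimp only
                  have hwin : pvWinIdx items = v.1 := by
                    simp [pvWinIdx, pvNT, pvTM, pvOT, hntC, htmoC, hothC]
                  have hD : pvDropIdx items = (items.filter (fun ir => ir.1 != v.1)).map (·.1) := by
                    unfold pvDropIdx; rw [if_neg hlen, if_neg hnt2', hwin]
                  have key := pvCase_oth items v vt hnd hntC htmoC hothC
                  refine ⟨fun x => ?_, by simp [pvWarnOf, hnt2']⟩
                  rw [hD]
                  simp only [PySem.Set.mem_update, List.tail_cons, key x]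
              | nil =>
                  exfalso
                  have hni : items = [] := by
                    have ha1 := List.filter_eq_nil_iff.mp hntC
                    have ha2 := List.filter_eq_nil_iff.mp htmoC
                    have ha3 := List.filter_eq_nil_iff.mp hothC
                    cases hI : items with
                    | nil => rfl
                    | cons a t =>
                        exfalso
                        have ha := ha1 a (hI ▸ List.mem_cons_self)
                        have hb := ha2 a (hI ▸ List.mem_cons_self)
                        have hc := ha3 a (hI ▸ List.mem_cons_self)
                        simp at ha hb hc
                        simp [ha, hb] at hc
                  rw [hni] at hlen
                  simp at hlen

theorem pvFoldA_spec (gs : List (String × List (Int × List (String × String))))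
    (st : PySem.Set Int × PySem.Set Int × List String)
    (hnd : ∀ p ∈ gs, (p.2.map Prod.fst).Nodup) :
    (∀ x : Int, x ∈ (gs.foldl pvMainStepA st).2.1 ↔ x ∈ st.2.1 ∨ ∃ p ∈ gs, x ∈ pvDropIdx p.2)
    ∧ (gs.foldl pvMainStepA st).2.2 = st.2.2 ++ gs.flatMap pvWarnOf := by
  induction gs generalizing st with
  | nil => exact ⟨fun x => by simp, by simp⟩
  | cons g gs ih =>
      obtain ⟨h1, h2⟩ := pvStepA_spec st g (hnd g List.mem_cons_self)
      obtain ⟨hm, hw⟩ := ih (pvMainStepA st g) (fun p hp => hnd p (List.mem_cons_of_mem g hp))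
      constructor
      · intro x
        simp only [List.foldl_cons, hm x, h1 x, List.mem_cons]
        constructor
        · rintro ((h | h) | ⟨p, hp, hd⟩)
          · exact Or.inl h
          · exact Or.inr ⟨g, Or.inl rfl, h⟩
          · exact Or.inr ⟨p, Or.inr hp, hd⟩
        · rintro (h | ⟨p, (rfl | hp), hd⟩)
          · exact Or.inl (Or.inl h)
          · exact Or.inl (Or.inr hd)
          · exact Or.inr ⟨p, hp, hd⟩
      · simp only [List.foldl_cons, hw, h2, List.flatMap_cons, List.append_assoc]

-- ---------- library-pattern instances for the two folds ----------

theorem pvKeysIns (l : List (Int × List (String × String)))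
    (d : PySem.Dict String (List (Int × List (String × String)))) :
    (l.foldl pvIns d).keys = PySem.Set.update d.keys (l.map (fun ir => pvEventId ir.2)) :=
  PySem.Dict.keys_foldl_insert_key l (fun ir => pvEventId ir.2)
    (fun d ir => d.getD (pvEventId ir.2) [] ++ [ir]) d

theorem pvNodupKeysIns (l : List (Int × List (String × String)))
    (d : PySem.Dict String (List (Int × List (String × String)))) (h : d.keys.Nodup) :
    (l.foldl pvIns d).keys.Nodup :=
  PySem.Dict.nodup_keys_foldl_insert_key l (fun ir => pvEventId ir.2)
    (fun d ir => d.getD (pvEventId ir.2) [] ++ [ir]) d h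

theorem pvKeysAgg (l : List (Int × List (String × String)))
    (d : PySem.Dict String (Int × Int × List String)) :
    (l.foldl pvAggIns d).keys = PySem.Set.update d.keys (l.map (fun ir => pvEventId ir.2)) :=
  PySem.Dict.keys_foldl_insert_key l (fun ir => pvEventId ir.2)
    (fun d ir => pvAggUpd (d.get? (pvEventId ir.2)) ir) d

theorem pvFlatMap_ite {α β : Type} (l : List α) (p : α → Prop) [DecidablePred p] (f : α → β) :
    (l.flatMap (fun x => if p x then [f x] else [])) = (l.filter (fun x => decide (p x))).map f := by
  induction l with
  | nil => rfl
  | cons x l ih =>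
      simp only [List.flatMap_cons, List.filter_cons]
      by_cases h : p x <;> simp [h, ih]

theorem pvContains_eq_not (s : PySem.Set Int) (i : Int) (b : Bool) (h : i ∈ s ↔ b = false) :
    PySem.Set.contains s i = !b := by
  cases b with
  | false => simp only [Bool.not_false]; exact (PySem.Set.contains_iff s i).mpr (h.mpr rfl)
  | true =>
      simp only [Bool.not_true]
      cases hc : PySem.Set.contains s i with
      | false => rfl
      | true => exact absurd (h.mp ((PySem.Set.contains_iff s i).mp hc)) (by simp)

theorem pvSingleton_of_len_le_one {α : Type} (l : List α) (x : α) (hx : x ∈ l)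
    (h : l.length ≤ 1) : l = [x] := by
  cases l with
  | nil => simp at hx
  | cons a t =>
      cases t with
      | nil => simp at hx; rw [hx]
      | cons b u => simp at h

-- ---------- the equivalence, on any input ----------

set_option maxHeartbeats 4000000 in
theorem pvEquiv (rows : List (List (String × String))) :
    resolve_duplicates_py rows = resolve_duplicates_py_alt rows := by
  simp only [resolve_duplicates_py, resolve_duplicates_py_alt]
  set en := PySem.List.enumerate rows with hen
  have hEnN : (en.map Prod.fst).Nodup := by
    rw [show en.map Prod.fst = PySem.List.pyRange 0 (0 + rows.length) from
      PySem.List.map_fst_enumerate rows 0]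
    exact PySem.List.nodup_pyRange_one _ _
  have hinj : ∀ (i : Int) (r s : List (String × String)),
      (i, r) ∈ en → (i, s) ∈ en → r = s := by
    intro i r s h1 h2
    have := List.inj_on_of_nodup_map hEnN h1 h2 (by rfl)
    exact congrArg Prod.snd this
  set L := en.filter (fun ir => pvEventId ir.2 != "") with hL
  have hmemL : ∀ ir, ir ∈ L ↔ ir ∈ en ∧ pvEventId ir.2 ≠ "" := by
    intro ir; rw [hL, List.mem_filter]; simp
  set G := L.foldl pvIns PySem.Dict.empty with hG
  set agg := L.foldl pvAggIns PySem.Dict.empty with hagg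
  set grp := fun e => L.filter (fun ir => pvEventId ir.2 == e) with hgrp
  -- the two dict folds, with the guard factored out
  have hGA : (en.foldl pvGroupStepA (PySem.Dict.empty, PySem.Set.empty)).1 = G := by
    rw [pvGroupA_fst, pvFoldl_guard]
  have hAGG : en.foldl pvAggStep PySem.Dict.empty = agg := by
    rw [show pvAggStep = (fun d ir => if pvEventId ir.2 = "" then d else pvAggIns d ir) from rfl,
        pvFoldl_guard]
  -- keys
  have hKeysEq : agg.keys = G.keys := by
    rw [hG, hagg, pvKeysIns, pvKeysAgg, PySem.Dict.keys_empty, PySem.Dict.keys_empty]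
  have hKndG : G.keys.Nodup := by
    rw [hG]; exact pvNodupKeysIns L PySem.Dict.empty (by rw [PySem.Dict.keys_empty]; exact List.nodup_nil)
  have hKndA : agg.keys.Nodup := by rw [hKeysEq]; exact hKndG
  have hKmem : ∀ e, e ∈ G.keys ↔ ∃ ir ∈ L, pvEventId ir.2 = e := by
    intro e
    rw [hG, pvKeysIns, PySem.Dict.keys_empty, PySem.Set.mem_update]
    simp [List.mem_map, eq_comm]
  -- per-key values
  have hGget : ∀ e, G.getD e [] = grp e := by
    intro e; rw [hG, pvGetD_group, PySem.Dict.getD_empty, List.nil_append]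
  have hAget : ∀ e, agg.get? e = (grp e).foldl (fun o ir => some (pvAggUpd o ir)) none := by
    intro e; rw [hagg, pvGet?_agg, PySem.Dict.get?_empty]
  have hGitems : G.items = G.keys.map (fun k => (k, grp k)) := by
    rw [PySem.Dict.items_eq_map_keys G hKndG []]
    exact List.map_congr_left (fun k _ => by rw [hGget k])
  have hAGGitems : agg.items = G.keys.map (fun k => (k, agg.getD k (0, 0, []))) := by
    rw [← hKeysEq]
    exact PySem.Dict.items_eq_map_keys agg hKndA (0, 0, [])
  -- groups: membership and index-uniqueness
  have hgrpnd : ∀ e, ((grp e).map Prod.fst).Nodup := by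
    intro e
    have s1 : (grp e).Sublist L := List.filter_sublist
    have s2 : L.Sublist en := List.filter_sublist
    exact ((s1.trans s2).map Prod.fst).nodup hEnN
  have hmemgrp : ∀ e ir, ir ∈ grp e ↔ ir ∈ en ∧ pvEventId ir.2 ≠ "" ∧ pvEventId ir.2 = e := by
    intro e ir
    rw [hgrp]; dsimp only
    rw [List.mem_filter, hmemL ir]
    simp [and_assoc]
  have hne : ∀ e ∈ G.keys, grp e ≠ [] := by
    intro e he
    obtain ⟨ir, hirL, hir⟩ := (hKmem e).mp he
    intro hnil
    have : ir ∈ grp e := by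
      rw [hmemgrp]
      exact ⟨((hmemL ir).mp hirL).1, ((hmemL ir).mp hirL).2, hir⟩
    rw [hnil] at this
    simp at this
  -- the aggregate at any live key
  have hsome : ∀ e ∈ G.keys, agg.get? e
      = some ((pvArgmin (grp e) (3, 0)).1, (pvArgmin (grp e) (3, 0)).2,
              (pvNT (grp e)).map (fun ir => pvOutcomeVal ir.2)) := by
    intro e he
    obtain ⟨v, vt, hcons⟩ := List.exists_cons_of_ne_nil (hne e he)
    rw [hAget e, hcons, pvAggFold_none]
  -- A's main fold over the groups
  obtain ⟨hDropIff0, hWarnA0⟩ := pvFoldA_spec G.items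
    (PySem.Set.ofList (en.foldl pvGroupStepA (PySem.Dict.empty, PySem.Set.empty)).2,
     PySem.Set.empty, [])
    (by
      rw [hGitems]
      intro p hp
      obtain ⟨k, -, rfl⟩ := List.mem_map.mp hp
      exact hgrpnd k)
  set drop := (G.items.foldl pvMainStepA
    (PySem.Set.ofList (en.foldl pvGroupStepA (PySem.Dict.empty, PySem.Set.empty)).2,
     PySem.Set.empty, [])).2.1 with hdrop
  have hDropIff : ∀ x : Int, x ∈ drop ↔ ∃ k ∈ G.keys, x ∈ pvDropIdx (grp k) := by
    intro x
    rw [hDropIff0 x]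
    constructor
    · rintro (h | ⟨p, hp, hd⟩)
      · simp [PySem.Set.empty] at h
      · rw [hGitems] at hp
        obtain ⟨k, hk, rfl⟩ := List.mem_map.mp hp
        exact ⟨k, hk, hd⟩
    · rintro ⟨k, hk, hd⟩
      exact Or.inr ⟨(k, grp k), by rw [hGitems]; exact List.mem_map.mpr ⟨k, hk, rfl⟩, hd⟩
  -- drop-membership only touches a row's own group
  have hown : ∀ (i : Int) (r : List (String × String)), (i, r) ∈ en →
      ∀ k ∈ G.keys, i ∈ pvDropIdx (grp k) → pvEventId r = k := by
    intro i r hir k hk hd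
    have : i ∈ (grp k).map Prod.fst := pvDropIdx_sub (grp k) i hd
    obtain ⟨⟨j, s⟩, hjs, hj⟩ := List.mem_map.mp this
    dsimp at hj
    subst hj
    have hm := (hmemgrp k (j, s)).mp hjs
    have : s = r := hinj j s r hm.1 hir
    rw [← this]
    exact hm.2.2
  -- the per-row keep/drop agreement
  have hpoint : ∀ ir ∈ en, PySem.Set.contains drop ir.1 = !(pvKept agg ir) := by
    rintro ⟨i, r⟩ hir
    apply pvContains_eq_not
    by_cases he : pvEventId r = ""
    · rw [show pvKept agg (i, r) = true by simp [pvKept, he]]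
      simp only [Bool.true_eq_false, iff_false]
      intro hmem
      obtain ⟨k, hk, hd⟩ := (hDropIff i).mp hmem
      have hk2 : pvEventId r = k := hown i r hir k hk hd
      obtain ⟨ir', hir'L, hir'e⟩ := (hKmem k).mp hk
      have hkne : k ≠ "" := by
        rw [← hir'e]; exact ((hmemL ir').mp hir'L).2
      exact hkne (by rw [← hk2, he])
    · set e := pvEventId r with hee
      have hinG : (i, r) ∈ grp e := (hmemgrp e (i, r)).mpr ⟨hir, he, rfl⟩
      have heK : e ∈ G.keys := (hKmem e).mpr ⟨(i, r), (hmemL (i, r)).mpr ⟨hir, he⟩, rfl⟩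
      have hA := hsome e heK
      have hke : pvKept agg (i, r)
          = (decide (1 < ((pvNT (grp e)).map (fun ir => pvOutcomeVal ir.2)).length)
             || i == (pvArgmin (grp e) (3, 0)).2) := by
        simp only [pvKept]
        rw [if_neg he, ← hee, hA]
      have hiff : i ∈ drop ↔ i ∈ pvDropIdx (grp e) := by
        rw [hDropIff i]
        constructor
        · rintro ⟨k, hk, hd⟩
          have : e = k := by rw [hee]; exact hown i r hir k hk hd
          rwa [this]
        · intro hd
          exact ⟨e, heK, hd⟩
      rw [hke, hiff]
      rw [List.length_map]
      by_cases hlen : (grp e).length ≤ 1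
      · have hsingle : grp e = [(i, r)] := pvSingleton_of_len_le_one (grp e) (i, r) hinG hlen
        have hwin : (pvArgmin (grp e) (3, 0)).2 = i := by
          rw [hsingle]
          simp [pvArgmin, if_pos (pvRank_lt_three r)]
        have hD : pvDropIdx (grp e) = [] := by unfold pvDropIdx; rw [if_pos hlen]
        rw [hD, hwin]
        simp
      · by_cases hwarn : 1 < (pvNT (grp e)).length
        · have hD : pvDropIdx (grp e) = [] := by
            unfold pvDropIdx; rw [if_neg hlen, if_pos hwarn]
          rw [hD]
          simp [hwarn]
        · have hwin : (pvArgmin (grp e) (3, 0)).2 = pvWinIdx (grp e) :=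
            pvWin_eq (grp e) (hne e heK)
          have hD : pvDropIdx (grp e)
              = ((grp e).filter (fun ir => ir.1 != pvWinIdx (grp e))).map (·.1) := by
            unfold pvDropIdx; rw [if_neg hlen, if_neg hwarn]
          rw [hD, hwin]
          have hm2 : i ∈ ((grp e).filter (fun ir => ir.1 != pvWinIdx (grp e))).map (·.1)
              ↔ i ≠ pvWinIdx (grp e) := by
            rw [show ((grp e).filter (fun ir => ir.1 != pvWinIdx (grp e))).map (·.1)
                = ((grp e).filter (fun ir => ir.1 != pvWinIdx (grp e))).map Prod.fst from rfl,
               pvMemIdx]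
            constructor
            · rintro ⟨s, -, hp⟩
              exact bne_iff_ne.mp hp
            · intro hne2
              exact ⟨r, hinG, bne_iff_ne.mpr hne2⟩
          rw [hm2, decide_eq_false hwarn]
          simp only [Bool.false_or]
          simp [beq_eq_false_iff_ne]
  -- warnings agree
  have hWarn : (G.items.foldl pvMainStepA
      (PySem.Set.ofList (en.foldl pvGroupStepA (PySem.Dict.empty, PySem.Set.empty)).2,
       PySem.Set.empty, [])).2.2
      = (agg.items.filter (fun p => decide (1 < p.2.2.2.length))).map
          (fun p => pvWarnStr p.1 p.2.2.2) := by
    rw [hWarnA0, List.nil_append, hGitems, List.flatMap_map]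
    rw [hAGGitems, List.filter_map, List.map_map]
    have hstep : ∀ k, pvWarnOf (k, grp k)
        = if 1 < (pvNT (grp k)).length then [pvWarnMsg k (pvNT (grp k))] else [] := by
      intro k; exact pvWarnOf_eq (k, grp k)
    calc (G.keys.flatMap fun k => pvWarnOf (k, grp k))
        = G.keys.flatMap (fun k => if 1 < (pvNT (grp k)).length
            then [pvWarnMsg k (pvNT (grp k))] else []) := by
          exact List.flatMap_congr (fun k _ => hstep k)
      _ = (G.keys.filter (fun k => decide (1 < (pvNT (grp k)).length))).map
            (fun k => pvWarnMsg k (pvNT (grp k))) := by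
          exact pvFlatMap_ite G.keys (fun k => 1 < (pvNT (grp k)).length) _
      _ = (G.keys.filter ((fun p => decide (1 < p.2.2.2.length)) ∘ fun k => (k, agg.getD k (0,0,[])))).map
            ((fun p => pvWarnStr p.1 p.2.2.2) ∘ fun k => (k, agg.getD k (0,0,[]))) := by
          rw [List.filter_congr (fun k hk => ?_)]
          · apply List.map_congr_left
            intro k hk
            have hkK : k ∈ G.keys := (List.mem_filter.mp hk).1
            have := hsome k hkK
            simp only [Function.comp_apply, PySem.Dict.getD_eq_get?_getD, this, Option.getD_some]
            rw [pvWarnMsg]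
          · have hkK : k ∈ G.keys := hk
            have := hsome k hkK
            simp only [Function.comp_apply, PySem.Dict.getD_eq_get?_getD, this, Option.getD_some]
            rw [List.length_map]
  -- assemble the triple
  rw [hGA, hAGG]
  refine congrArg₂ Prod.mk ?_ (congrArg₂ Prod.mk ?_ ?_)
  · refine congrArg _ (List.filter_congr fun ir h => ?_)
    rw [hpoint ir h, Bool.not_not]
  · refine congrArg _ (List.filter_congr fun ir h => ?_)
    exact hpoint ir h
  · exact hWarn

-- ===== VERDICT (by name: the statement is the Claim_ definition above) =====
theorem resolve_duplicates_py_spec : Claim_equal_resolve_duplicates_py := by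
  intro rows _
  unfold Spec_resolve_duplicates_py
  exact pvEquiv rows
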